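-- pv_equiv track=rewrite | github.com/Usman095/Graph-DOM | src/outputs.py | core_coverage
-- ===== SOURCE A (Python) =====
-- def core_coverage(nominal_dict, pathway_dict, family_dict):
--     total_cores = 0
--     nom_core = {}
--     for pre, cores in pathway_dict.items():
--         nom_mz = nominal_dict[pre]
--         for core in cores:
--             if nom_mz not in nom_core:
--                 nom_core[nom_mz] = set()
--             nom_core[nom_mz].add(core)
--
--     for _, core_set in nom_core.items():
--         total_cores += len(core_set)
--
--     nom_core = {}
--     family_cores = 0
--     for prec_id, family_group in family_dict.items():
--         for family in family_group:
--             for row in family: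
--                 nom_mz = nominal_dict[row[0]]
--                 if nom_mz not in nom_core:
--                     nom_core[nom_mz] = set()
--                 nom_core[nom_mz].add(row[1])
--
--     for _, core_set in nom_core.items():
--         family_cores += len(core_set)
--
--     return total_cores, family_cores
-- ===== SOURCE B (Python) =====
-- def core_coverage(nominal_dict, pathway_dict, family_dict):
--     pathway_pairs = [(nominal_dict[pre], core)
--                      for pre, cores in pathway_dict.items()
--                      for core in cores]
--     family_pairs = [(nominal_dict[row[0]], row[1])
--                     for family_group in family_dict.values()
--                     for family in family_group
--                     for row in family]
--     return _distinct(pathway_pairs), _distinct(family_pairs)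
--
--
-- def _distinct(pairs):
--     count = 0
--     prev = None
--     for p in sorted(pairs):
--         if p != prev:
--             count += 1
--         prev = p
--     return count
-- ===== Notes on version B (the rewrite author's own statement) =====
-- stated objective: alternative
-- what changed: B replaces A's incremental dict-of-sets grouping (create-set-if-absent, add, then a summation loop over the groups) by a sort-then-scan algorithm: each source is flattened into an explicit list of (nominal mass, core) pairs, the list is sorted so equal pairs become adjacent, and one linear scan counts the positions where the pair changes, which is exactly the number of distinct pairs and hence A's sum of per-mass set sizes.
import Mathlib
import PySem

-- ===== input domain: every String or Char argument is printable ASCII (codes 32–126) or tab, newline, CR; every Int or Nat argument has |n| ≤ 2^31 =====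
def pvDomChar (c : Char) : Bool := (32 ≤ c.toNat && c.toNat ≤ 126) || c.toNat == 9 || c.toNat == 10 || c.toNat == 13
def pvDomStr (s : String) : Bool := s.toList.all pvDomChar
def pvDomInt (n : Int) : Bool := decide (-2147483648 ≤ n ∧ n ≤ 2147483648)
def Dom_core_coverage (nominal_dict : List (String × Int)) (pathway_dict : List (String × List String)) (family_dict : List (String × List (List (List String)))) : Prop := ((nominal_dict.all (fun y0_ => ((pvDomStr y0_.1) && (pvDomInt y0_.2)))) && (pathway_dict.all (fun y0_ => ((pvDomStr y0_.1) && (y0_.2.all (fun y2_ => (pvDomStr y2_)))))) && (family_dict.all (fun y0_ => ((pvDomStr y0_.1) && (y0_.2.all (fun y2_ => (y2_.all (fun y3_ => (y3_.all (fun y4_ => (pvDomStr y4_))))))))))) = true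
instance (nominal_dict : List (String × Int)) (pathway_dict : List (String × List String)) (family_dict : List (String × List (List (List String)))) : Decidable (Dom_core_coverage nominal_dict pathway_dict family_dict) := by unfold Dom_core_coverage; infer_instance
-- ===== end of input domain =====

-- B replaces A's incremental dict-of-sets grouping by a different algorithm: flatten each source
-- into an explicit list of (nominal mass, core) pairs, sort it, and count boundaries between
-- adjacent runs of equal pairs — objective: alternative (sort-then-scan instead of hash grouping).

-- ===== PORT A =====
-- helper for A's two statements 'if nom_mz not in nom_core: nom_core[nom_mz] = set()' ; 'nom_core[nom_mz].add(core)'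
def pvAddCore (nc : PySem.Dict Int (PySem.Set String)) (nom_mz : Int) (core : String) : PySem.Dict Int (PySem.Set String) :=
  let nc1 := if nc.contains nom_mz then nc else nc.insert nom_mz PySem.Set.empty
  nc1.modify nom_mz PySem.Set.empty (fun s => s.add core)

def core_coverage (nominal_dict : List (String × Int)) (pathway_dict : List (String × List String)) (family_dict : List (String × List (List (List String)))) : Int × Int :=
  let nominal := PySem.Dict.ofList nominal_dict
  let nomCore1 := (PySem.Dict.ofList pathway_dict).items.foldl
    (fun nc pc =>
      let nom_mz := nominal.getD pc.1 0   -- nominal_dict[pre]; KeyError excluded by Pre_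
      pc.2.foldl (fun nc core => pvAddCore nc nom_mz core) nc)
    PySem.Dict.empty
  let total_cores := nomCore1.items.foldl (fun acc p => acc + PySem.Set.len p.2) 0
  let nomCore2 := (PySem.Dict.ofList family_dict).items.foldl
    (fun nc pg =>
      pg.2.foldl (fun nc family =>
        family.foldl (fun nc row =>
          -- nominal_dict[row[0]] and row[1]; IndexError/KeyError excluded by Pre_
          let nom_mz := nominal.getD (PySem.List.pyGetD row 0 "") 0
          pvAddCore nc nom_mz (PySem.List.pyGetD row 1 "")) nc) nc)
    PySem.Dict.empty
  let family_cores := nomCore2.items.foldl (fun acc p => acc + PySem.Set.len p.2) 0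
  (total_cores, family_cores)

-- ===== PORT B =====
-- Source B's _distinct: sort the pair list (Python tuple order = lexicographic, exact here via the
-- Lex linear order on Int × String), then one scan counting positions where the pair changes.
def pvDistinct (pairs : List (Int × String)) : Int :=
  ((PySem.List.sorted2 pairs (fun p => p.1) (fun p => p.2)).foldl
    (fun cp p => ((if some p ≠ cp.2 then cp.1 + 1 else cp.1), some p))
    ((0 : Int), (none : Option (Int × String)))).1

def core_coverage_alt (nominal_dict : List (String × Int)) (pathway_dict : List (String × List String)) (family_dict : List (String × List (List (List String)))) : Int × Int :=
  let nominal := PySem.Dict.ofList nominal_dict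
  let pathway_pairs := (PySem.Dict.ofList pathway_dict).items.flatMap
    (fun pc => pc.2.map (fun core => (nominal.getD pc.1 0, core)))
  let family_pairs := (PySem.Dict.ofList family_dict).values.flatMap
    (fun family_group => family_group.flatMap (fun family => family.map (fun row =>
      (nominal.getD (PySem.List.pyGetD row 0 "") 0, PySem.List.pyGetD row 1 ""))))
  (pvDistinct pathway_pairs, pvDistinct family_pairs)

-- ===== PRECONDITION & SPEC =====
-- Pre_ excludes exactly the inputs where Python A raises: a pathway key missing from nominal_dict
-- (KeyError), a family row of length < 2 (IndexError), or a family row whose first entry is missing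
-- from nominal_dict (KeyError). (Quantifying over the raw association lists also covers shadowed
-- duplicate-key entries, which Python's dict would drop.)
def Pre_core_coverage (nominal_dict : List (String × Int)) (pathway_dict : List (String × List String)) (family_dict : List (String × List (List (List String)))) : Prop :=
  (∀ p ∈ pathway_dict, (PySem.Dict.ofList nominal_dict).contains p.1 = true) ∧
  (∀ p ∈ family_dict, ∀ family ∈ p.2, ∀ row ∈ family,
      2 ≤ row.length ∧ (PySem.Dict.ofList nominal_dict).contains (row.getD 0 "") = true)
instance (nominal_dict : List (String × Int)) (pathway_dict : List (String × List String)) (family_dict : List (String × List (List (List String)))) : Decidable (Pre_core_coverage nominal_dict pathway_dict family_dict) := by unfold Pre_core_coverage; infer_instance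

def pvWitness_core_coverage : (List (String × Int)) × (List (String × List String)) × (List (String × List (List (List String)))) :=
  ([("a", 5), ("b", 5)], [("a", ["x", "y"]), ("b", ["x"])], [("p", [[["a", "x"], ["b", "z"]]])])

def Spec_core_coverage (nominal_dict : List (String × Int)) (pathway_dict : List (String × List String)) (family_dict : List (String × List (List (List String)))) (out : Int × Int) : Prop := out = core_coverage_alt nominal_dict pathway_dict family_dict
instance (nominal_dict : List (String × Int)) (pathway_dict : List (String × List String)) (family_dict : List (String × List (List (List String)))) (out : Int × Int) : Decidable (Spec_core_coverage nominal_dict pathway_dict family_dict out) := by unfold Spec_core_coverage; infer_instance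

-- ===== CLAIM (what is proved, stated in full; the proofs are below) =====
def Claim_equal_core_coverage : Prop := ∀ (nominal_dict : List (String × Int)) (pathway_dict : List (String × List String)) (family_dict : List (String × List (List (List String)))), Dom_core_coverage nominal_dict pathway_dict family_dict → Pre_core_coverage nominal_dict pathway_dict family_dict → Spec_core_coverage nominal_dict pathway_dict family_dict (core_coverage nominal_dict pathway_dict family_dict)

-- ===== LEMMAS AND PROOFS =====

-- The invariant tying A's dict-of-sets to a flat set of (nom_mz, core) pairs:
-- unique keys, same membership, same total size.
def pvInv (d : PySem.Dict Int (PySem.Set String)) (s : List (Int × String)) : Prop :=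
  d.keys.Nodup ∧
  (∀ k c, c ∈ d.getD k PySem.Set.empty ↔ (k, c) ∈ s) ∧
  (d.keys.map (fun k => (d.getD k PySem.Set.empty).length)).sum = s.length

lemma pvAddCore_getD (d : PySem.Dict Int (PySem.Set String)) (k k' : Int) (c : String) :
    (pvAddCore d k c).getD k' PySem.Set.empty =
      if k' = k then (d.getD k PySem.Set.empty).add c else d.getD k' PySem.Set.empty := by
  unfold pvAddCore
  by_cases h : d.contains k = true
  · rw [if_pos h, PySem.Dict.getD_modify]
  · rw [if_neg (by simpa using h), PySem.Dict.getD_modify]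
    by_cases hk : k' = k
    · rw [if_pos hk, if_pos hk, PySem.Dict.getD_insert_self,
        PySem.Dict.getD_of_not_contains d _ (by simpa using h)]
    · rw [if_neg hk, if_neg hk, PySem.Dict.getD_insert_of_ne _ _ _ hk]

lemma pvAddCore_keys (d : PySem.Dict Int (PySem.Set String)) (k : Int) (c : String) :
    (pvAddCore d k c).keys = if d.contains k then d.keys else d.keys ++ [k] := by
  unfold pvAddCore
  by_cases h : d.contains k = true
  · simp [h, PySem.Dict.keys_modify, PySem.Dict.keys_insert_of_contains _ _ h]
  · simp only [h, if_false, Bool.false_eq_true, PySem.Dict.keys_modify]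
    rw [PySem.Dict.keys_insert_of_contains _ _ (PySem.Dict.contains_insert_self d k PySem.Set.empty),
      PySem.Dict.keys_insert_of_not_contains _ _ (by simpa using h)]

lemma pv_sum_update (l : List Int) (f g : Int → Nat) (k : Int) (hnd : l.Nodup) (hk : k ∈ l)
    (hgk : g k = f k + 1) (hg : ∀ x ∈ l, x ≠ k → g x = f x) :
    (l.map g).sum = (l.map f).sum + 1 := by
  induction l with
  | nil => cases hk
  | cons a t ih =>
    obtain ⟨ha, hndt⟩ := List.nodup_cons.mp hnd
    rcases List.mem_cons.mp hk with rfl | hkt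
    · have ht : ∀ x ∈ t, g x = f x := fun x hx => hg x (List.mem_cons_of_mem _ hx) (fun h => ha (h ▸ hx))
      simp only [List.map_cons, List.sum_cons, hgk, List.map_congr_left ht]
      omega
    · have hak : a ≠ k := fun h => ha (h ▸ hkt)
      have := ih hndt hkt (fun x hx hxk => hg x (List.mem_cons_of_mem _ hx) hxk)
      simp only [List.map_cons, List.sum_cons, this, hg a (List.mem_cons_self) hak]
      omega

lemma pvInv_step (d : PySem.Dict Int (PySem.Set String)) (s : List (Int × String)) (k : Int) (c : String)
    (h : pvInv d s) : pvInv (pvAddCore d k c) (PySem.Set.add s (k, c)) := by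
  obtain ⟨hnd, hmem, hsum⟩ := h
  by_cases hc : (k, c) ∈ s
  · -- pair already seen: both sides unchanged
    have hv : c ∈ d.getD k PySem.Set.empty := (hmem k c).mpr hc
    have hvadd : (d.getD k PySem.Set.empty).add c = d.getD k PySem.Set.empty := PySem.Set.add_of_mem hv
    have hcont : d.contains k = true := by
      by_contra h'
      rw [PySem.Dict.getD_of_not_contains d _ (by simpa using h')] at hv
      simp [PySem.Set.empty] at hv
    have hall : ∀ k', (pvAddCore d k c).getD k' PySem.Set.empty = d.getD k' PySem.Set.empty := by
      intro k'
      rw [pvAddCore_getD]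
      by_cases hk : k' = k
      · rw [if_pos hk, hk, hvadd]
      · rw [if_neg hk]
    rw [PySem.Set.add_of_mem hc]
    refine ⟨by rw [pvAddCore_keys, if_pos hcont]; exact hnd,
      fun k' c' => by rw [hall]; exact hmem k' c', ?_⟩
    rw [pvAddCore_keys, if_pos hcont]
    simpa only [hall] using hsum
  · -- new pair: both sides grow by one
    have hv : c ∉ d.getD k PySem.Set.empty := fun h => hc ((hmem k c).mp h)
    have hvadd : (d.getD k PySem.Set.empty).add c = d.getD k PySem.Set.empty ++ [c] :=
      PySem.Set.add_of_not_mem hv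
    rw [PySem.Set.add_of_not_mem hc]
    have hmem' : ∀ k' c', c' ∈ (pvAddCore d k c).getD k' PySem.Set.empty ↔ (k', c') ∈ s ++ [(k, c)] := by
      intro k' c'
      rw [pvAddCore_getD]
      by_cases hk : k' = k
      · subst hk
        rw [if_pos rfl, hvadd, List.mem_append, List.mem_append, List.mem_singleton,
          List.mem_singleton, hmem]
        constructor
        · rintro (h | h)
          · exact Or.inl h
          · exact Or.inr (by rw [h])
        · rintro (h | h)
          · exact Or.inl h
          · exact Or.inr (congrArg Prod.snd h)
      · rw [if_neg hk, List.mem_append, List.mem_singleton, hmem]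
        constructor
        · exact Or.inl
        · rintro (h | h)
          · exact h
          · exact absurd (congrArg Prod.fst h) hk
    by_cases hcont : d.contains k = true
    · have hkmem : k ∈ d.keys := (PySem.Dict.contains_iff_mem_keys d k).mp hcont
      refine ⟨by rw [pvAddCore_keys, if_pos hcont]; exact hnd, hmem', ?_⟩
      rw [pvAddCore_keys, if_pos hcont, List.length_append, List.length_singleton]
      rw [pv_sum_update d.keys (fun k' => (d.getD k' PySem.Set.empty).length)
            (fun k' => ((pvAddCore d k c).getD k' PySem.Set.empty).length) k hnd hkmem
            (by show ((pvAddCore d k c).getD k PySem.Set.empty).length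
                  = (d.getD k PySem.Set.empty).length + 1
                rw [pvAddCore_getD, if_pos rfl, hvadd, List.length_append, List.length_singleton])
            (fun x _ hx => by
                show ((pvAddCore d k c).getD x PySem.Set.empty).length
                  = (d.getD x PySem.Set.empty).length
                rw [pvAddCore_getD, if_neg hx]), hsum]
    · have hkmem : k ∉ d.keys := fun h => hcont ((PySem.Dict.contains_iff_mem_keys d k).mpr h)
      have hvk : d.getD k PySem.Set.empty = PySem.Set.empty :=
        PySem.Dict.getD_of_not_contains d _ (by simpa using hcont)
      have hnotc : d.contains k = false := by simpa using hcont
      refine ⟨?_, hmem', ?_⟩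
      · rw [pvAddCore_keys, if_neg (by simp [hnotc])]
        simp [List.nodup_append, hnd]
        exact fun a ha h => hkmem (h ▸ ha)
      · rw [pvAddCore_keys, if_neg (by simp [hnotc]), List.map_append, List.sum_append,
          List.length_append, List.length_singleton]
        have h1 : ∀ x ∈ d.keys, ((pvAddCore d k c).getD x PySem.Set.empty).length
            = (d.getD x PySem.Set.empty).length := by
          intro x hx
          have : x ≠ k := fun h => hkmem (h ▸ hx)
          rw [pvAddCore_getD, if_neg this]
        have h2 : (pvAddCore d k c).getD k PySem.Set.empty = PySem.Set.empty ++ [c] := by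
          rw [pvAddCore_getD, if_pos rfl, hvadd, hvk]
        rw [List.map_congr_left h1, hsum, List.map_singleton, h2]
        simp [PySem.Set.empty]

lemma pvInv_foldl {α : Type} (fA : PySem.Dict Int (PySem.Set String) → α → PySem.Dict Int (PySem.Set String))
    (fB : List (Int × String) → α → List (Int × String))
    (hstep : ∀ d s x, pvInv d s → pvInv (fA d x) (fB s x)) :
    ∀ (l : List α) (d : PySem.Dict Int (PySem.Set String)) (s : List (Int × String)),
      pvInv d s → pvInv (l.foldl fA d) (l.foldl fB s) := by
  intro l
  induction l with
  | nil => intro d s h; simpa using h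
  | cons a t ih => intro d s h; simpa using ih _ _ (hstep d s a h)

lemma pvInv_empty : pvInv PySem.Dict.empty PySem.Set.empty := by
  refine ⟨by simp [PySem.Dict.keys_empty], ?_, by simp [PySem.Dict.keys_empty, PySem.Set.empty]⟩
  intro k c
  simp [PySem.Dict.getD_empty, PySem.Set.empty]

lemma pvInv_total (d : PySem.Dict Int (PySem.Set String)) (s : List (Int × String)) (h : pvInv d s) :
    d.items.foldl (fun acc p => acc + PySem.Set.len p.2) 0 = PySem.Set.len s := by
  obtain ⟨hnd, _, hsum⟩ := h
  simp only [PySem.List.foldl_add, zero_add]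
  rw [PySem.Dict.items_eq_map_keys d hnd PySem.Set.empty]
  simp only [List.map_map, PySem.Set.len, Function.comp_def]
  rw [← hsum, Nat.cast_list_sum, List.map_map]
  rfl

-- ---------- B-side: the sort-then-scan count equals the number of distinct pairs ----------

-- a fold over a flatMap is the nested fold
lemma pv_foldl_flatMap {α β γ : Type} (l : List α) (g : α → List β) (f : γ → β → γ) (i : γ) :
    (l.flatMap g).foldl f i = l.foldl (fun a x => (g x).foldl f a) i := by
  induction l generalizing i with
  | nil => rfl
  | cons h t ih => simp [List.foldl_append, ih]

-- sorting by the two tuple components is sorting by the lexicographic order on the pair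
lemma pv_sorted2_eq_sorted_lex (pairs : List (Int × String)) :
    PySem.List.sorted2 pairs (fun p => p.1) (fun p => p.2)
      = PySem.List.sorted pairs (fun p => toLex p) := by
  rw [PySem.List.sorted_eq_foldl_insertBy]
  unfold PySem.List.sorted2
  simp only [if_neg (by decide : ¬ (false = true))]
  congr 1
  funext acc x
  congr 1
  funext a b
  have : (toLex a < toLex b) ↔ (a.1 < b.1 ∨ a.1 = b.1 ∧ a.2 < b.2) := Prod.Lex.lt_iff
  rcases lt_trichotomy a.1 b.1 with h | h | h
  · simp [this, h, not_lt_of_gt h]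
  · simp [this, h]
  · simp [this, h, not_lt_of_gt h, ne_of_gt h]

-- scan step: (count, prev) ← (count + [p ≠ prev], some p)
lemma pv_scan_some (M : List (Int × String)) :
    ∀ (c : Int) (p : Int × String),
    M.Pairwise (fun a b => toLex a ≤ toLex b) → (∀ x ∈ M, toLex p ≤ toLex x) →
    (M.foldl (fun cp q => ((if some q ≠ cp.2 then cp.1 + 1 else cp.1), some q)) (c, some p)).1
      = c + (((PySem.Set.ofList M).discard p).length : Int) := by
  induction M with
  | nil => intro c p _ _; simp [PySem.Set.ofList, PySem.Set.discard]
  | cons a t ih =>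
    intro c p hpw hp
    obtain ⟨ha, hpt⟩ := List.pairwise_cons.mp hpw
    rw [List.foldl_cons]
    by_cases hap : a = p
    · subst hap
      rw [if_neg (by simp : ¬ ((some a : Option (Int × String)) ≠ some a))]
      rw [ih c a hpt ha, PySem.Set.ofList_cons]
      simp [PySem.Set.discard, List.filter_filter]
    · have hpa : toLex p ≤ toLex a := hp a List.mem_cons_self
      have hpnt : p ∉ t := by
        intro hmem
        exact hap (toLex.injective (le_antisymm (ha p hmem) hpa))
      rw [if_pos (by simpa using (fun h => hap (Option.some.inj h)))]
      rw [ih (c + 1) a hpt ha, PySem.Set.ofList_cons]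
      have hfix : (PySem.Set.discard (a :: (PySem.Set.ofList t).discard a) p)
          = a :: ((PySem.Set.ofList t).discard a) := by
        simp only [PySem.Set.discard]
        rw [List.filter_cons_of_pos (by simpa using hap), List.filter_filter]
        congr 1
        apply List.filter_congr
        intro x hx
        have hxp : x ≠ p := by
          intro h; subst h
          exact hpnt ((PySem.Set.mem_ofList _ _).mp hx)
        simp [hxp]
      rw [hfix]
      simp only [List.length_cons]
      push_cast
      ring

lemma pv_scan_none (M : List (Int × String))
    (hpw : M.Pairwise (fun a b => toLex a ≤ toLex b)) :
    (M.foldl (fun cp q => ((if some q ≠ cp.2 then cp.1 + 1 else cp.1), some q))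
      ((0 : Int), (none : Option (Int × String)))).1
      = ((PySem.Set.ofList M).length : Int) := by
  cases M with
  | nil => simp [PySem.Set.ofList]
  | cons a t =>
    obtain ⟨ha, hpt⟩ := List.pairwise_cons.mp hpw
    rw [List.foldl_cons]
    simp only [ne_eq, reduceCtorEq, not_false_eq_true, if_pos]
    rw [pv_scan_some t (0 + 1) a hpt ha, PySem.Set.ofList_cons]
    simp only [List.length_cons]
    push_cast
    ring

-- the number of distinct elements is permutation-invariant
lemma pv_ofList_length_of_perm (L M : List (Int × String)) (h : L.Perm M) :
    (PySem.Set.ofList L).length = (PySem.Set.ofList M).length := by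
  have hfin : ∀ N : List (Int × String), (PySem.Set.ofList N).toFinset = N.toFinset := by
    intro N
    ext x
    simp [PySem.Set.mem_ofList]
  have hc : ∀ N : List (Int × String), (PySem.Set.ofList N).length = N.toFinset.card := by
    intro N
    rw [← hfin N, List.toFinset_card_of_nodup (PySem.Set.nodup_ofList N)]
  rw [hc, hc, List.toFinset_eq_of_perm _ _ h]

-- Source B's _distinct counts exactly the distinct pairs of its argument
lemma pvDistinct_eq (L : List (Int × String)) :
    pvDistinct L = PySem.Set.len (L.foldl PySem.Set.add []) := by
  unfold pvDistinct
  rw [pv_sorted2_eq_sorted_lex,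
    pv_scan_none _ (PySem.List.sorted_pairwise L (fun p => toLex p)),
    pv_ofList_length_of_perm _ _ (PySem.List.sorted_perm L (fun p => toLex p) false),
    PySem.Set.ofList_eq_foldl]
  simp [PySem.Set.len]

-- ===== VERDICT (by name: the statement is the Claim_ definition above) =====
set_option maxHeartbeats 1000000 in
theorem core_coverage_spec : Claim_equal_core_coverage := by
  intro nominal_dict pathway_dict family_dict _ _
  unfold Spec_core_coverage core_coverage core_coverage_alt
  dsimp only
  have h1 := pvInv_foldl
    (fun nc pc => pc.2.foldl (fun nc core =>
        pvAddCore nc ((PySem.Dict.ofList nominal_dict).getD pc.1 0) core) nc)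
    (fun s pc => pc.2.foldl (fun s core =>
        PySem.Set.add s ((PySem.Dict.ofList nominal_dict).getD pc.1 0, core)) s)
    (fun d s pc hInv => pvInv_foldl
      (fun nc core => pvAddCore nc ((PySem.Dict.ofList nominal_dict).getD pc.1 0) core)
      (fun s core => PySem.Set.add s ((PySem.Dict.ofList nominal_dict).getD pc.1 0, core))
      (fun d s core hInv => pvInv_step d s _ core hInv) pc.2 d s hInv)
    (PySem.Dict.ofList pathway_dict).items _ _ pvInv_empty
  have h2 := pvInv_foldl
    (fun nc pg => pg.2.foldl (fun nc family => family.foldl (fun nc row =>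
        pvAddCore nc ((PySem.Dict.ofList nominal_dict).getD (PySem.List.pyGetD row 0 "") 0)
          (PySem.List.pyGetD row 1 "")) nc) nc)
    (fun s pg => pg.2.foldl (fun s family => family.foldl (fun s row =>
        PySem.Set.add s ((PySem.Dict.ofList nominal_dict).getD (PySem.List.pyGetD row 0 "") 0,
          PySem.List.pyGetD row 1 "")) s) s)
    (fun d s pg hInv => pvInv_foldl
      (fun nc family => family.foldl (fun nc row =>
          pvAddCore nc ((PySem.Dict.ofList nominal_dict).getD (PySem.List.pyGetD row 0 "") 0)
            (PySem.List.pyGetD row 1 "")) nc)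
      (fun s family => family.foldl (fun s row =>
          PySem.Set.add s ((PySem.Dict.ofList nominal_dict).getD (PySem.List.pyGetD row 0 "") 0,
            PySem.List.pyGetD row 1 "")) s)
      (fun d s family hInv => pvInv_foldl
        (fun nc row => pvAddCore nc ((PySem.Dict.ofList nominal_dict).getD (PySem.List.pyGetD row 0 "") 0)
            (PySem.List.pyGetD row 1 ""))
        (fun s row => PySem.Set.add s ((PySem.Dict.ofList nominal_dict).getD (PySem.List.pyGetD row 0 "") 0,
            PySem.List.pyGetD row 1 ""))
        (fun d s row hInv => pvInv_step d s _ _ hInv) family d s hInv) pg.2 d s hInv)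
    (PySem.Dict.ofList family_dict).items _ _ pvInv_empty
  refine Prod.ext ?_ ?_
  · dsimp only
    rw [pvInv_total _ _ h1, pvDistinct_eq, pv_foldl_flatMap]
    simp only [List.foldl_map]
    rfl
  · dsimp only
    rw [pvInv_total _ _ h2, pvDistinct_eq]
    simp only [PySem.Dict.values, List.flatMap_map]
    rw [pv_foldl_flatMap]
    have hin : ∀ (s : List (Int × String)) (pg : String × List (List (List String))),
        ((pg.2.flatMap (fun family => family.map (fun row =>
            ((PySem.Dict.ofList nominal_dict).getD (PySem.List.pyGetD row 0 "") 0,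
              PySem.List.pyGetD row 1 "")))).foldl PySem.Set.add s)
          = pg.2.foldl (fun s family => family.foldl (fun s row =>
              PySem.Set.add s ((PySem.Dict.ofList nominal_dict).getD (PySem.List.pyGetD row 0 "") 0,
                PySem.List.pyGetD row 1 "")) s) s := by
      intro s pg
      rw [pv_foldl_flatMap]
      simp only [List.foldl_map]
    simp only [hin]
    rfl
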